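-- pv_equiv track=rewrite | github.com/jgd10/AdventOfCode2025 | aoc.py | long_sum
-- ===== SOURCE A (Python) =====
-- def long_sum(data: list[list[int]]) -> tuple[int, ...]:
--     carry = 0
--     result = []
--     while any([len(row) > 0 for row in data]):
--         total = sum([row.pop() for row in data if len(row) > 0])
--         ans = str(total + carry)
--         if len(ans) > 1:
--             carry = int(ans[:-1])
--             ans = ans[-1]
--         else:
--             carry = 0
--         result.insert(0, int(ans))
--     if carry > 0:
--         result.insert(0, carry)
--     return tuple(result)
-- ===== SOURCE B (Python) =====
-- def long_sum(data: list[list[int]]) -> tuple[int, ...]: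
--     # One arithmetic pass: each row read MSB-first is an integer; sum them,
--     # then peel the max-row-length low digits back off, leftover carry in front.
--     # (A empties its rows in place via pop(); B does not mutate its argument.)
--     width = 0
--     for row in data:
--         if width < len(row):
--             width = len(row)
--     total = 0
--     for row in data:
--         value = 0
--         for d in row:
--             value = value * 10 + d
--         total += value
--     out = []
--     for _ in range(width):
--         total, d = divmod(total, 10)
--         out.append(d)
--     out.reverse()
--     if total > 0:
--         out.insert(0, total)
--     return tuple(out)
-- ===== Notes on version B (the rewrite author's own statement) =====
-- stated objective: alternative
-- what changed: Replaces A's per-column pop()/str-based carry loop by summing each row's integer value (one fold per row) and then peeling the digits off that single total with divmod.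
-- outside the precondition, e.g. on long_sum([[-34]]): A returns (4,), B returns (6,); on long_sum([[-3]]): A raises ValueError, B returns (7,)
import Mathlib
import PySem

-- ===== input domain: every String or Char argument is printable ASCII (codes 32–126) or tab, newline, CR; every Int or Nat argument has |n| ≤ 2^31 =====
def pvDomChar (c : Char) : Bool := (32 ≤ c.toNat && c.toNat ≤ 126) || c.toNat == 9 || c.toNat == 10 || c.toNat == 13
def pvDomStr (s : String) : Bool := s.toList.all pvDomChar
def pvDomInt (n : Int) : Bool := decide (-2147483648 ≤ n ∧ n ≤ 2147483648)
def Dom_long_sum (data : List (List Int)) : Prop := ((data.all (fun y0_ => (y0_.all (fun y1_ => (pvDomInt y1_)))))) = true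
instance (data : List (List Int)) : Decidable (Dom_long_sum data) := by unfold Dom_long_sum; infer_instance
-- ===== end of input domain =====

-- B replaces A's per-column pop/str-carry loop by one arithmetic sum of the rows' values
-- followed by a digit-extraction pass (alternative algorithm; return value only — A
-- additionally empties every row of its argument in place via pop(), B does not mutate).

-- ===== PORT A =====
-- Hand-ported int(s): exact replica of Python's base-10 int() (strip int-whitespace,
-- optional sign, digits with single underscores between them; ValueError = none).
-- PySem.Int.ofStr? computes the same function, but its digit-parsing core is private
-- to the prelude, so this file carries its own copy to be able to reason about it.
def intGo : List Char → Bool → Nat → Option Nat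
  | [], afterDigit, acc => if afterDigit = true then some acc else none
  | c :: rest, afterDigit, acc =>
    if c.isDigit = true then intGo rest true (acc * 10 + (c.toNat - '0'.toNat))
    else
      if c = '_' ∧ afterDigit = true then
        match rest with
        | d :: _ => if d.isDigit = true then intGo rest false acc else none
        | [] => none
      else none

def intDigitsVal? : List Char → Option Nat
  | [] => none
  | cs => intGo cs false 0

def intOfChars (s : List Char) : Option Int :=
  let cs := ((s.dropWhile PySem.Int.isIntSpace).reverse.dropWhile PySem.Int.isIntSpace).reverse
  if cs.head? = some '-' then (intDigitsVal? cs.tail).map (fun n => -(n : Int))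
  else if cs.head? = some '+' then (intDigitsVal? cs.tail).map (fun n => (n : Int))
  else (intDigitsVal? cs).map (fun n => (n : Int))

-- row after `row.pop()` (only executed on non-empty rows) is the row without its last element
theorem pop_row_eq (row : List Int) :
    (if 0 < row.length then ((PySem.List.pop? row).map (·.2)).getD [] else row) = row.dropLast := by
  rcases List.eq_nil_or_concat row with rfl | ⟨xs, x, rfl⟩
  · simp
  · rw [List.concat_eq_append, if_pos (by simp)]
    simp [PySem.List.pop?_last]

theorem sumLen_dropLast_le (data : List (List Int)) :
    ((data.map List.dropLast).map List.length).sum ≤ (data.map List.length).sum := by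
  induction data with
  | nil => simp
  | cons r tl ih =>
    simp only [List.map_cons, List.sum_cons]
    have : r.dropLast.length ≤ r.length := by simp [List.length_dropLast]
    omega

theorem sumLen_dropLast_lt (data : List (List Int))
    (h : data.any (fun row => decide (0 < row.length)) = true) :
    ((data.map List.dropLast).map List.length).sum < (data.map List.length).sum := by
  induction data with
  | nil => simp at h
  | cons r tl ih =>
    simp only [List.any_cons, Bool.or_eq_true, decide_eq_true_eq] at h
    simp only [List.map_cons, List.sum_cons]
    rcases h with h | h
    · have h1 : r.dropLast.length < r.length := by simp [List.length_dropLast]; omega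
      have h2 := sumLen_dropLast_le tl
      omega
    · have h1 : r.dropLast.length ≤ r.length := by simp [List.length_dropLast]
      have h2 := ih h
      omega

def popAll (data : List (List Int)) : List (List Int) :=
  data.map (fun row =>
    if 0 < row.length then ((PySem.List.pop? row).map (·.2)).getD [] else row)

theorem popAll_eq (data : List (List Int)) : popAll data = data.map List.dropLast := by
  unfold popAll
  simp only [pop_row_eq]

theorem sumLen_pop_lt (data : List (List Int))
    (h : data.any (fun row => decide (0 < row.length)) = true) :
    ((popAll data).map List.length).sum < (data.map List.length).sum := by
  rw [popAll_eq]
  exact sumLen_dropLast_lt data h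

def loopA (data : List (List Int)) (carry : Int) (result : List Int) : List Int :=
  if hany : data.any (fun row => decide (0 < row.length)) then
    let popped : List Int :=
      (data.filter (fun row => decide (0 < row.length))).filterMap
        (fun row => (PySem.List.pop? row).map (·.1))
    let total : Int := popped.sum
    let data' := popAll data
    let ans := PySem.Int.toChars (total + carry)
    if 1 < ans.length then
      loopA data' ((intOfChars (PySem.List.slice ans none (some (-1)))).getD 0)
        (PySem.List.insert result 0
          (((PySem.List.pyGet? ans (-1)).bind (fun c => intOfChars [c])).getD 0))
    else
      loopA data' 0 (PySem.List.insert result 0 ((intOfChars ans).getD 0))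
  else
    if 0 < carry then PySem.List.insert result 0 carry else result
termination_by (data.map List.length).sum
decreasing_by
  all_goals exact sumLen_pop_lt data hany

def long_sum (data : List (List Int)) : List Int :=
  loopA data 0 []

-- ===== PORT B =====
def long_sum_alt (data : List (List Int)) : List Int :=
  let width := data.foldl (fun w row => if w < row.length then row.length else w) 0
  let total := data.foldl (fun tot row => tot + row.foldl (fun v d => v * 10 + d) 0) (0 : Int)
  let p := (List.range width).foldl
    (fun (p : Int × List Int) _ => (PySem.Int.floordiv p.1 10, p.2 ++ [PySem.Int.mod p.1 10]))
    (total, [])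
  let out := p.2.reverse
  if 0 < p.1 then p.1 :: out else out

-- ===== PRECONDITION & SPEC =====
def rowVal (row : List Int) : Int := row.foldl (fun v d => v * 10 + d) 0
def mW (data : List (List Int)) : Nat := (data.map List.length).foldr max 0
-- T data k = the sum, over the rows, of the value of the row's last k digits
def T (data : List (List Int)) (k : Nat) : Int :=
  (data.map (fun row => rowVal (row.drop (row.length - k)))).sum

-- Pre_ restricts to inputs whose column-suffix sums are all non-negative (in particular the
-- natural domain, rows of non-negative digits): whenever some suffix sum is negative, A's
-- string-based carry step hits a negative intermediate and either raises ValueError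
-- (int('-')) or silently truncates the '-' sign off the intermediate string, an artefact
-- of its str/int carry extraction.
def Pre_long_sum (data : List (List Int)) : Prop := ∀ k < mW data, 0 ≤ T data (k + 1)
instance (data : List (List Int)) : Decidable (Pre_long_sum data) := by
  unfold Pre_long_sum; infer_instance

def pvWitness_long_sum : List (List Int) := [[9, 9], [1, 2, 3], []]

def Spec_long_sum (data : List (List Int)) (out : List Int) : Prop := out = long_sum_alt data
instance (data : List (List Int)) (out : List Int) : Decidable (Spec_long_sum data out) := by
  unfold Spec_long_sum; infer_instance

-- ===== CLAIM (what is proved, stated in full; the proofs are below) =====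
def Claim_equal_long_sum : Prop := ∀ (data : List (List Int)),
  Dom_long_sum data → Pre_long_sum data → Spec_long_sum data (long_sum data)

-- ===== LEMMAS AND PROOFS =====

-- abstract values used by the equivalence argument
def SV (data : List (List Int)) : Int := (data.map rowVal).sum
def colSum (data : List (List Int)) : Int := (data.filterMap (fun row => row.getLast?)).sum
def pd : Int → Nat → List Int
  | _, 0 => []
  | t, (L + 1) => t % 10 :: pd (t / 10) L

def digitChars : List Char := ['0','1','2','3','4','5','6','7','8','9']

-- ---- suffix sums and the loop hypothesis ----
theorem rowVal_concat (xs : List Int) (d : Int) : rowVal (xs ++ [d]) = rowVal xs * 10 + d := by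
  unfold rowVal
  rw [List.foldl_append]
  rfl

theorem colSum_eq_sum_getLastD (data : List (List Int)) :
    colSum data = (data.map (fun row => row.getLast?.getD 0)).sum := by
  induction data with
  | nil => rfl
  | cons r tl ih =>
    rcases List.eq_nil_or_concat r with rfl | ⟨xs, x, rfl⟩
    · simpa [colSum, List.filterMap_cons] using ih
    · simp only [colSum, List.filterMap_cons, List.concat_eq_append, List.getLast?_concat,
        List.map_cons, List.sum_cons, Option.getD_some] at *
      rw [ih]

theorem row_suffix_step (row : List Int) (k : Nat) :
    rowVal (row.drop (row.length - (k + 1)))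
      = 10 * rowVal (row.dropLast.drop (row.dropLast.length - k)) + row.getLast?.getD 0 := by
  rcases List.eq_nil_or_concat row with rfl | ⟨xs, x, rfl⟩
  · simp [rowVal]
  · rw [List.concat_eq_append]
    have hlen : (xs ++ [x]).length = xs.length + 1 := by simp
    have hdrop : (xs ++ [x]).drop ((xs ++ [x]).length - (k + 1))
        = xs.drop (xs.length - k) ++ [x] := by
      rw [hlen, Nat.succ_sub_succ, List.drop_append_of_le_length (by omega)]
    rw [hdrop, rowVal_concat, List.dropLast_concat, List.getLast?_concat, Option.getD_some]
    omega

theorem T_step (data : List (List Int)) (k : Nat) :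
    T data (k + 1) = 10 * T (data.map List.dropLast) k + colSum data := by
  rw [colSum_eq_sum_getLastD]
  unfold T
  induction data with
  | nil => simp
  | cons r tl ih =>
    simp only [List.map_cons, List.sum_cons] at *
    rw [row_suffix_step r k]
    omega

theorem T_zero (data : List (List Int)) : T data 0 = 0 := by
  unfold T
  induction data with
  | nil => rfl
  | cons r tl ih =>
    simp only [List.map_cons, List.sum_cons, Nat.sub_zero, List.drop_length] at *
    simp [rowVal]

theorem T_one (data : List (List Int)) : T data 1 = colSum data := by
  have h := T_step data 0
  rw [T_zero] at h
  simpa using h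

theorem len_le_mW (data : List (List Int)) : ∀ row ∈ data, row.length ≤ mW data := by
  induction data with
  | nil => simp
  | cons r tl ih =>
    intro row hrow
    rcases List.mem_cons.1 hrow with rfl | hrow
    · show row.length ≤ max row.length (mW tl); omega
    · have := ih row hrow
      show row.length ≤ max r.length (mW tl); omega

theorem T_sat (data : List (List Int)) {k : Nat} (h : mW data ≤ k) : T data k = SV data := by
  unfold T SV
  congr 1
  apply List.map_congr_left
  intro row hrow
  have : row.length ≤ k := le_trans (len_le_mW data row hrow) h
  rw [Nat.sub_eq_zero_of_le this, List.drop_zero]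

-- the invariant hypothesis carried around A's loop
def Hyp (data : List (List Int)) (carry : Int) : Prop :=
  0 ≤ carry ∧ ∀ k : Nat, 0 ≤ T data (k + 1) + carry

theorem hyp_zero {data : List (List Int)} (h : Pre_long_sum data) : Hyp data 0 := by
  refine ⟨le_rfl, fun k => ?_⟩
  rw [add_zero]
  by_cases hk : k < mW data
  · exact h k hk
  · rw [T_sat data (k := k + 1) (by omega)]
    rcases Nat.eq_zero_or_pos (mW data) with h0 | h0
    · rw [← T_sat data (k := 1) (by omega), T_one, colSum_eq_sum_getLastD]
      apply List.sum_nonneg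
      intro x hx
      obtain ⟨row, hrow, rfl⟩ := List.mem_map.1 hx
      have hle := len_le_mW data row hrow
      have : row = [] := List.eq_nil_of_length_eq_zero (by omega)
      simp [this]
    · have := h (mW data - 1) (by omega)
      rwa [Nat.sub_add_cancel (by omega), T_sat data (k := mW data) le_rfl] at this

theorem hyp_step {data : List (List Int)} {carry : Int} (h : Hyp data carry) :
    Hyp (data.map List.dropLast) ((colSum data + carry) / 10) := by
  have hx0 : 0 ≤ colSum data + carry := by
    have := h.2 0
    rwa [T_one] at this
  refine ⟨Int.ediv_nonneg hx0 (by omega), fun k => ?_⟩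
  have hts := T_step data (k + 1)
  have : T (data.map List.dropLast) (k + 1) + (colSum data + carry) / 10
      = (colSum data + carry + 10 * T (data.map List.dropLast) (k + 1)) / 10 := by
    rw [Int.add_mul_ediv_left _ _ (by omega : (10:Int) ≠ 0)]
    omega
  rw [this]
  apply Int.ediv_nonneg _ (by omega)
  have := h.2 (k + 1)
  omega

-- ---- Nat.toDigits characterisation ----
theorem tdc_acc (f : Nat) : ∀ (n : Nat) (acc : List Char),
    Nat.toDigitsCore 10 f n acc = Nat.toDigitsCore 10 f n [] ++ acc := by
  induction f with
  | zero => intro n acc; rfl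
  | succ f ih =>
    intro n acc
    show (if n / 10 = 0 then _ :: acc else Nat.toDigitsCore 10 f (n / 10) (_ :: acc))
        = (if n / 10 = 0 then _ :: [] else Nat.toDigitsCore 10 f (n / 10) (_ :: [])) ++ acc
    by_cases h : n / 10 = 0
    · simp [h]
    · rw [if_neg h, if_neg h, ih (n / 10) [Nat.digitChar (n % 10)],
        ih (n / 10) (Nat.digitChar (n % 10) :: acc)]
      simp

theorem tdc_fuel : ∀ (n f g : Nat), n < f → n < g → ∀ acc,
    Nat.toDigitsCore 10 f n acc = Nat.toDigitsCore 10 g n acc := by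
  intro n
  induction n using Nat.strong_induction_on with
  | _ n ih =>
    intro f g hf hg acc
    obtain ⟨f, rfl⟩ : ∃ f', f = f' + 1 := ⟨f - 1, by omega⟩
    obtain ⟨g, rfl⟩ : ∃ g', g = g' + 1 := ⟨g - 1, by omega⟩
    show (if n / 10 = 0 then _ else Nat.toDigitsCore 10 f (n / 10) _)
        = (if n / 10 = 0 then _ else Nat.toDigitsCore 10 g (n / 10) _)
    by_cases h : n / 10 = 0
    · simp [h]
    · rw [if_neg h, if_neg h]
      have hlt : n / 10 < n := Nat.div_lt_self (by omega) (by omega)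
      exact ih (n / 10) hlt f g (by omega) (by omega) _

theorem toDigits_small {n : Nat} (h : n < 10) : Nat.toDigits 10 n = [Nat.digitChar n] := by
  show (if n / 10 = 0 then [Nat.digitChar (n % 10)] else Nat.toDigitsCore 10 n (n / 10) [Nat.digitChar (n % 10)]) = _
  rw [if_pos (Nat.div_eq_of_lt h), Nat.mod_eq_of_lt h]

theorem toDigits_step {n : Nat} (h : 10 ≤ n) :
    Nat.toDigits 10 n = Nat.toDigits 10 (n / 10) ++ [Nat.digitChar (n % 10)] := by
  unfold Nat.toDigits
  have hne : ¬ n / 10 = 0 := by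
    have := Nat.div_le_div_right (c := 10) h
    simp at this; omega
  show (if n / 10 = 0 then _ else Nat.toDigitsCore 10 n (n / 10) [Nat.digitChar (n % 10)]) = _
  rw [if_neg hne, tdc_acc]
  congr 1
  exact tdc_fuel (n / 10) n (n / 10 + 1) (Nat.div_lt_self (by omega) (by omega)) (by omega) []

theorem toDigits_ne_nil (n : Nat) : Nat.toDigits 10 n ≠ [] := by
  by_cases h : n < 10
  · simp [toDigits_small h]
  · simp [toDigits_step (n := n) (by omega)]

theorem toDigits_len_iff (n : Nat) : 1 < (Nat.toDigits 10 n).length ↔ 10 ≤ n := by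
  constructor
  · intro h
    by_contra hn
    rw [toDigits_small (by omega)] at h
    simp at h
  · intro h
    rw [toDigits_step h]
    have := List.length_pos_iff.mpr (toDigits_ne_nil (n / 10))
    simp; omega

theorem digitChar_mem {d : Nat} (h : d < 10) : Nat.digitChar d ∈ digitChars := by
  interval_cases d; all_goals decide

theorem toDigits_mem (n : Nat) : ∀ c ∈ Nat.toDigits 10 n, c ∈ digitChars := by
  induction n using Nat.strong_induction_on with
  | _ n ih =>
    by_cases h : n < 10
    · rw [toDigits_small h]
      intro c hc
      simp at hc
      subst hc
      exact digitChar_mem h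
    · rw [toDigits_step (n := n) (by omega)]
      intro c hc
      rcases List.mem_append.1 hc with hc | hc
      · exact ih (n / 10) (Nat.div_lt_self (by omega) (by omega)) c hc
      · simp at hc; subst hc
        exact digitChar_mem (Nat.mod_lt _ (by omega))

-- ---- facts about the digit characters ----
theorem digitChars_facts : ∀ c ∈ digitChars,
    c.isDigit = true ∧ PySem.Int.isIntSpace c = false ∧ c ≠ '-' ∧ c ≠ '+' := by
  intro c hc
  fin_cases hc <;>
    exact ⟨by decide, by simp [PySem.Int.isIntSpace], by decide, by decide⟩

-- ---- the hand-ported int() on pure digit strings ----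
theorem intGo_digits : ∀ (cs : List Char) (b : Bool) (acc : Nat),
    (∀ c ∈ cs, c ∈ digitChars) → (cs ≠ [] ∨ b = true) →
    intGo cs b acc = some (cs.foldl (fun a c => a * 10 + (c.toNat - 48)) acc) := by
  intro cs
  induction cs with
  | nil =>
    intro b acc _ hb
    rcases hb with hb | hb
    · simp at hb
    · subst hb; simp [intGo]
  | cons c rest ih =>
    intro b acc hmem _
    have hd : c.isDigit = true := (digitChars_facts c (hmem c (by simp))).1
    show (if c.isDigit = true then intGo rest true (acc * 10 + (c.toNat - '0'.toNat)) else _) = _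
    rw [if_pos hd]
    have h0 : '0'.toNat = 48 := by decide
    rw [h0]
    rw [ih true (acc * 10 + (c.toNat - 48)) (fun x hx => hmem x (by simp [hx])) (Or.inr rfl)]
    simp [List.foldl_cons]

theorem foldl_toDigits (n : Nat) : ∀ acc : Nat,
    (Nat.toDigits 10 n).foldl (fun a c => a * 10 + (c.toNat - 48)) acc
      = acc * 10 ^ (Nat.toDigits 10 n).length + n := by
  induction n using Nat.strong_induction_on with
  | _ n ih =>
    intro acc
    by_cases h : n < 10
    · rw [toDigits_small h]
      have : (Nat.digitChar n).toNat - 48 = n := by interval_cases n; all_goals decide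
      simp [this]
    · rw [toDigits_step (n := n) (by omega)]
      rw [List.foldl_append]
      rw [ih (n / 10) (Nat.div_lt_self (by omega) (by omega)) acc]
      have hmod : (Nat.digitChar (n % 10)).toNat - 48 = n % 10 := by
        have := Nat.mod_lt n (y := 10) (by omega)
        set d := n % 10 with hd
        interval_cases d; all_goals decide
      simp only [List.foldl_cons, List.foldl_nil, hmod, List.length_append, List.length_cons,
        List.length_nil]
      have := Nat.div_add_mod n 10
      ring_nf
      omega

theorem dropWhile_digits {cs : List Char} (h : ∀ c ∈ cs, c ∈ digitChars) :
    cs.dropWhile PySem.Int.isIntSpace = cs := by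
  cases cs with
  | nil => rfl
  | cons c rest =>
    rw [List.dropWhile_cons_of_neg]
    simp [(digitChars_facts c (h c (by simp))).2.1]

theorem strip_digits {cs : List Char} (h : ∀ c ∈ cs, c ∈ digitChars) :
    ((cs.dropWhile PySem.Int.isIntSpace).reverse.dropWhile PySem.Int.isIntSpace).reverse = cs := by
  rw [dropWhile_digits h, dropWhile_digits (by intro c hc; exact h c (List.mem_reverse.1 hc)),
    List.reverse_reverse]

theorem intOfChars_digits {cs : List Char} (hmem : ∀ c ∈ cs, c ∈ digitChars) (hne : cs ≠ []) :
    intOfChars cs = some ((cs.foldl (fun a c => a * 10 + (c.toNat - 48)) 0 : Nat) : Int) := by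
  unfold intOfChars
  rw [strip_digits hmem]
  obtain ⟨c, rest, rfl⟩ := List.exists_cons_of_ne_nil hne
  have hc := digitChars_facts c (hmem c (by simp))
  rw [if_neg (by simp [hc.2.2.1]), if_neg (by simp [hc.2.2.2])]
  have : intDigitsVal? (c :: rest) = intGo (c :: rest) false 0 := by rfl
  rw [this, intGo_digits (c :: rest) false 0 hmem (Or.inl (by simp))]
  rfl

theorem intOfChars_toDigits (n : Nat) :
    intOfChars (Nat.toDigits 10 n) = some (n : Int) := by
  rw [intOfChars_digits (toDigits_mem n) (toDigits_ne_nil n), foldl_toDigits n 0]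
  simp

-- ---- the A-side string step, arithmetically ----
theorem toChars_nonneg {x : Int} (h : 0 ≤ x) :
    PySem.Int.toChars x = Nat.toDigits 10 x.toNat := by
  unfold PySem.Int.toChars
  rw [if_neg (by omega)]

theorem carry_parse {x : Int} (h0 : 0 ≤ x) (h10 : 10 ≤ x) :
    (intOfChars (PySem.List.slice (PySem.Int.toChars x) none (some (-1)))).getD 0 = x / 10 := by
  rw [PySem.List.slice_to_neg_one, toChars_nonneg h0,
    toDigits_step (n := x.toNat) (by omega)]
  rw [List.dropLast_concat]
  rw [intOfChars_toDigits]
  rw [Option.getD_some]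
  rw [Int.natCast_div]
  congr 1; all_goals omega

theorem digit_parse {x : Int} (h0 : 0 ≤ x) (h10 : 10 ≤ x) :
    (((PySem.List.pyGet? (PySem.Int.toChars x) (-1)).bind (fun c => intOfChars [c])).getD 0)
      = x % 10 := by
  rw [PySem.List.pyGet?_neg_one, toChars_nonneg h0, toDigits_step (n := x.toNat) (by omega),
    List.getLast?_concat]
  have hlt : x.toNat % 10 < 10 := Nat.mod_lt _ (by omega)
  have : intOfChars [Nat.digitChar (x.toNat % 10)] = some ((x.toNat % 10 : Nat) : Int) := by
    rw [← toDigits_small hlt, intOfChars_toDigits]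
  simp only [Option.bind_some, this, Option.getD_some]
  rw [Int.natCast_mod]
  congr 1; all_goals omega

theorem whole_parse {x : Int} (h0 : 0 ≤ x) :
    (intOfChars (PySem.Int.toChars x)).getD 0 = x := by
  rw [toChars_nonneg h0, intOfChars_toDigits, Option.getD_some]
  omega

theorem len_toChars_iff {x : Int} (h0 : 0 ≤ x) :
    1 < (PySem.Int.toChars x).length ↔ 10 ≤ x := by
  rw [toChars_nonneg h0, toDigits_len_iff]
  omega

-- ---- structural lemmas about one column step ----
theorem popped_eq (data : List (List Int)) :
    (data.filter (fun row => decide (0 < row.length))).filterMap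
        (fun row => (PySem.List.pop? row).map (·.1))
      = data.filterMap (fun row => row.getLast?) := by
  induction data with
  | nil => rfl
  | cons r tl ih =>
    rcases eq_or_ne r [] with h | h
    · subst h; simpa using ih
    · rcases List.eq_nil_or_concat r with h' | ⟨xs, x, rfl⟩
      · exact absurd h' h
      rw [List.concat_eq_append]
      rw [List.filter_cons_of_pos (by simp), List.filterMap_cons, List.filterMap_cons]
      simp only [PySem.List.pop?_last, Option.map_some, List.getLast?_concat]
      rw [ih]

theorem mW_dropLast (data : List (List Int)) :
    mW (data.map List.dropLast) = mW data - 1 := by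
  induction data with
  | nil => rfl
  | cons r tl ih =>
    show max r.dropLast.length (mW (tl.map List.dropLast)) = max r.length (mW tl) - 1
    rw [ih, List.length_dropLast]
    omega

theorem mW_zero_iff (data : List (List Int)) :
    (data.any (fun row => decide (0 < row.length)) = true) ↔ 0 < mW data := by
  induction data with
  | nil => simp [mW]
  | cons r tl ih =>
    simp only [List.any_cons, Bool.or_eq_true, decide_eq_true_eq]
    rw [ih]
    show _ ↔ 0 < max r.length (mW tl)
    omega

theorem SV_step (data : List (List Int)) :
    SV data = 10 * SV (data.map List.dropLast) + colSum data := by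
  induction data with
  | nil => simp [SV, colSum]
  | cons r tl ih =>
    rcases eq_or_ne r [] with h | h
    · subst h
      simp only [SV, colSum, List.map_cons, List.sum_cons, List.filterMap_cons] at *
      simpa [rowVal] using ih
    · rcases List.eq_nil_or_concat r with h' | ⟨xs, x, rfl⟩
      · exact absurd h' h
      rw [List.concat_eq_append]
      simp only [SV, colSum, List.map_cons, List.sum_cons, List.filterMap_cons,
        List.getLast?_concat, List.dropLast_concat] at *
      rw [rowVal_concat]
      omega

-- ---- the invariant of A's loop ----
theorem loopA_inv : ∀ (n : Nat) (data : List (List Int)) (carry : Int) (result : List Int),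
    mW data = n → Hyp data carry →
    loopA data carry result =
      (if 0 < (SV data + carry) / 10 ^ mW data then [(SV data + carry) / 10 ^ mW data] else [])
        ++ (pd (SV data + carry) (mW data)).reverse ++ result := by
  intro n
  induction n with
  | zero =>
    intro data carry result hmw hyp
    have hc : 0 ≤ carry := hyp.1
    have hany : ¬ (data.any (fun row => decide (0 < row.length)) = true) := by
      rw [mW_zero_iff, hmw]; omega
    rw [loopA, dif_neg hany]
    have hSV : SV data = 0 := by
      unfold SV
      apply List.sum_eq_zero
      intro x hx
      obtain ⟨row, hrow, rfl⟩ := List.mem_map.1 hx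
      have : row = [] := by
        by_contra hne
        exact hany (List.any_eq_true.2 ⟨row, hrow, by simp [List.length_pos_iff, hne]⟩)
      simp [this, rowVal]
    rw [hmw, hSV]
    simp only [pd, pow_zero, Int.ediv_one, zero_add, List.reverse_nil]
    split
    · simp [PySem.List.insert_zero]
    · simp
  | succ n ih =>
    intro data carry result hmw hyp
    have hany : data.any (fun row => decide (0 < row.length)) = true := by
      rw [mW_zero_iff, hmw]; omega
    rw [loopA, dif_pos hany]
    simp only [popAll_eq, popped_eq]
    rw [show (data.filterMap (fun row => row.getLast?)).sum = colSum data from rfl]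
    set x : Int := colSum data + carry with hx
    have hx0 : 0 ≤ x := by
      have := hyp.2 0
      rw [T_one] at this
      omega
    have hmw' : mW (data.map List.dropLast) = n := by rw [mW_dropLast, hmw]; omega
    have hyp' : Hyp (data.map List.dropLast) (x / 10) := hyp_step hyp
    have hstep :
        loopA (data.map List.dropLast) (x / 10) (x % 10 :: result) =
          (if 0 < (SV (data.map List.dropLast) + x / 10) / 10 ^ n
            then [(SV (data.map List.dropLast) + x / 10) / 10 ^ n] else [])
          ++ (pd (SV (data.map List.dropLast) + x / 10) n).reverse ++ (x % 10 :: result) := by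
      rw [ih (data.map List.dropLast) (x / 10) (x % 10 :: result) hmw' hyp']
      rw [hmw']
    have hbranch :
        (if 1 < (PySem.Int.toChars x).length then
          loopA (data.map List.dropLast)
            ((intOfChars (PySem.List.slice (PySem.Int.toChars x) none (some (-1)))).getD 0)
            (PySem.List.insert result 0
              (((PySem.List.pyGet? (PySem.Int.toChars x) (-1)).bind
                  (fun c => intOfChars [c])).getD 0))
        else
          loopA (data.map List.dropLast) 0
            (PySem.List.insert result 0 ((intOfChars (PySem.Int.toChars x)).getD 0)))
        = loopA (data.map List.dropLast) (x / 10) (x % 10 :: result) := by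
      by_cases h10 : 10 ≤ x
      · rw [if_pos ((len_toChars_iff hx0).2 h10), carry_parse hx0 h10, digit_parse hx0 h10,
          PySem.List.insert_zero]
      · rw [if_neg (by rw [len_toChars_iff hx0]; omega), whole_parse hx0,
          PySem.List.insert_zero]
        rw [Int.ediv_eq_zero_of_lt hx0 (by omega), Int.emod_eq_of_lt hx0 (by omega)]
    rw [hbranch, hstep]
    -- arithmetic reassembly
    have hSV := SV_step data
    set S' : Int := SV (data.map List.dropLast) with hS'
    have ht : SV data + carry = x + 10 * S' := by omega
    have hdiv : (SV data + carry) / 10 = S' + x / 10 := by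
      rw [ht, Int.add_mul_ediv_left x S' (by omega)]
      omega
    have hmod : (SV data + carry) % 10 = x % 10 := by
      rw [ht, Int.add_mul_emod_self_left]
    rw [hmw]
    have hpow : (SV data + carry) / 10 ^ (n + 1) = (S' + x / 10) / 10 ^ n := by
      rw [pow_succ, mul_comm, ← Int.ediv_ediv_of_nonneg (by omega), hdiv]
    have hpd : pd (SV data + carry) (n + 1) = x % 10 :: pd (S' + x / 10) n := by
      rw [pd, hmod, hdiv]
    rw [hpow, hpd]
    simp [List.append_assoc]

-- ---- B-side characterisation ----
theorem width_foldl (data : List (List Int)) : ∀ a : Nat,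
    data.foldl (fun w row => if w < row.length then row.length else w) a = max a (mW data) := by
  induction data with
  | nil => intro a; simp [mW]
  | cons r tl ih =>
    intro a
    rw [List.foldl_cons, ih]
    have : (if a < r.length then r.length else a) = max a r.length := by split <;> omega
    rw [this]
    simp only [mW, List.map_cons, List.foldr_cons]
    omega

theorem total_foldl (data : List (List Int)) : ∀ a : Int,
    data.foldl (fun tot row => tot + row.foldl (fun v d => v * 10 + d) 0) a = a + SV data := by
  induction data with
  | nil => intro a; simp [SV]
  | cons r tl ih =>
    intro a
    rw [List.foldl_cons, ih]
    simp only [SV, List.map_cons, List.sum_cons]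
    show a + r.foldl (fun v d => v * 10 + d) 0 + _ = a + (rowVal r + _)
    unfold rowVal
    omega

theorem pd_high (L : Nat) : ∀ t : Int, pd t (L + 1) = pd t L ++ [t / 10 ^ L % 10] := by
  induction L with
  | zero => intro t; simp [pd]
  | succ L ih =>
    intro t
    rw [pd, ih (t / 10)]
    rw [pd]
    simp only [List.cons_append]
    congr 2
    rw [pow_succ, mul_comm, ← Int.ediv_ediv_of_nonneg (by positivity)]

theorem bloop (L : Nat) : ∀ (t : Int) (acc : List Int),
    (List.range L).foldl
        (fun (p : Int × List Int) _ => (PySem.Int.floordiv p.1 10, p.2 ++ [PySem.Int.mod p.1 10]))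
        (t, acc)
      = (t / 10 ^ L, acc ++ pd t L) := by
  induction L with
  | zero => intro t acc; simp [pd]
  | succ L ih =>
    intro t acc
    rw [List.range_succ, List.foldl_append, ih]
    simp only [List.foldl_cons, List.foldl_nil]
    rw [PySem.Int.floordiv_eq_ediv_of_pos (by omega), PySem.Int.mod_eq_emod_of_pos (by omega)]
    rw [pd_high]
    rw [pow_succ, ← Int.ediv_ediv_of_nonneg (by positivity)]
    simp [List.append_assoc]

theorem alt_char (data : List (List Int)) :
    long_sum_alt data =
      (if 0 < SV data / 10 ^ mW data then [SV data / 10 ^ mW data] else [])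
        ++ (pd (SV data) (mW data)).reverse := by
  unfold long_sum_alt
  rw [width_foldl data 0, total_foldl data 0]
  simp only [Nat.zero_max, zero_add]
  rw [bloop (mW data) (SV data) []]
  simp only [List.nil_append]
  split
  · simp
  · simp

-- ===== VERDICT (by name: the statement is the Claim_ definition above) =====
theorem long_sum_spec : Claim_equal_long_sum := by
  intro data _hdom hpre
  unfold Spec_long_sum
  unfold long_sum
  rw [loopA_inv (mW data) data 0 [] rfl (hyp_zero hpre), alt_char]
  simp
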